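-- pv_equiv track=rewrite | github.com/sequential-parameter-optimization/spotPython | src/spotpython/hyperparameters/categorical.py | sum_encoded_values
-- ===== SOURCE A (Python) =====
-- def sum_encoded_values(strings, encoding_dict) -> int:
--     """Sum the encoded values of a list of strings.
--
--     Args:
--         strings (list): List of strings to encode.
--         encoding_dict (dict): Dictionary of strings and their one hot encoded values.
--
--     Returns:
--         int: Decimal value of the sum of the encoded values.
--
--     Examples:
--         >>> encoding_dict = {'a': [1, 0, 0], 'b': [0, 1, 0], 'c': [0, 0, 1]}
--             sum_encoded_values(['a', 'b', 'c'], encoding_dict)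
--             7
--             sum_encoded_values(['a', 'c'], encoding_dict)
--             5
--     """
--     result = [0] * len(list(encoding_dict.values())[0])
--     for string in strings:
--         encoded_value = encoding_dict.get(string)
--         if encoded_value:
--             result = [sum(x) for x in zip(result, encoded_value)]
--     decimal_result = 0
--     for i, value in enumerate(result[::-1]):
--         decimal_result += value * (2**i)
--     return decimal_result
-- ===== SOURCE B (Python) =====
-- def sum_encoded_values(strings, encoding_dict) -> int:
--     """Sum of the decimal values of the strings' one-hot encodings."""
--     total = 0
--     for string in strings:
--         encoded = encoding_dict.get(string)
--         if encoded:
--             value = 0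
--             for component in encoded:
--                 value = 2 * value + component
--             total += value
--     return total
-- ===== Notes on version B (the rewrite author's own statement) =====
-- stated objective: simpler
-- what changed: A componentwise zip-sums the encodings into a result vector and converts that vector to decimal in a second pass; B keeps a single running integer, converting each encoding to its decimal value by Horner's rule and adding it, with no vector and no conversion pass.
-- intended difference: On inputs where some used encoding is longer than the dict's first value or two used encodings have different lengths, A's zip silently drops trailing components (returning the truncated vector's value) while B converts every encoding at its full length; an encoding dict's vectors are meant to be read whole, so B's value is the intended one. — e.g. on sum_encoded_values(["a", "b"], [("a", [1]), ("b", [0, 1])]): A returns 1, B returns 2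
import Mathlib
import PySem

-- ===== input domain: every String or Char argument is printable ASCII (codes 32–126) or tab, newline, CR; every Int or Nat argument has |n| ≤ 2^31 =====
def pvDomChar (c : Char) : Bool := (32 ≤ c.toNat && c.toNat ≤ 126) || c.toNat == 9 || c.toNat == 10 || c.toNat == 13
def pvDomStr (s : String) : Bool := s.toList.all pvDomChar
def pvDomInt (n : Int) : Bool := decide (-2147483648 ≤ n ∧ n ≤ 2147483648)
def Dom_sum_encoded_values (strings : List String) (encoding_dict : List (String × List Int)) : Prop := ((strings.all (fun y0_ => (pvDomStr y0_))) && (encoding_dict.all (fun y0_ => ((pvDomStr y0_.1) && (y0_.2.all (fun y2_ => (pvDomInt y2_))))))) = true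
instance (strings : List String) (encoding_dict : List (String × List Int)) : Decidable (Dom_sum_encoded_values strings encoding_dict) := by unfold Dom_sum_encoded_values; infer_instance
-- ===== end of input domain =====

-- B keeps one running integer, adding each looked-up encoding's decimal value (Horner's rule),
-- instead of A's componentwise vector accumulation plus a final binary-to-decimal pass (simpler; return value only).

-- ===== PORT A =====
def sum_encoded_values (strings : List String) (encoding_dict : List (String × List Int)) : Int :=
  let d := PySem.Dict.mk encoding_dict
  -- result = [0] * len(list(encoding_dict.values())[0])  ([0] raises on empty dict: excluded by Pre_)
  let result0 : List Int := List.replicate (((PySem.List.pyGet? d.values 0).getD []).length) 0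
  -- for string in strings: if encoding_dict.get(string): result = [sum(x) for x in zip(result, ...)]
  let result := strings.foldl (fun r s =>
    match d.get? s with
    | some e => if e = [] then r else List.zipWith (· + ·) r e
    | none => r) result0
  -- result[::-1] is exactly List.reverse; enumerate index i ≥ 0, so 2**i is 2 ^ i.toNat
  (PySem.List.enumerate result.reverse 0).foldl (fun acc p => acc + p.2 * 2 ^ p.1.toNat) 0

-- ===== PORT B =====
def sum_encoded_values_alt (strings : List String) (encoding_dict : List (String × List Int)) : Int :=
  let d := PySem.Dict.mk encoding_dict
  -- total = 0; for string in strings: if encoded: value via Horner; total += value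
  strings.foldl (fun total s =>
    match d.get? s with
    | some e => if e = [] then total else total + e.foldl (fun v c => 2 * v + c) 0
    | none => total) 0

-- ===== PRECONDITION & SPEC =====
-- Pre_ excludes only the empty dict, where Python A raises IndexError (list(encoding_dict.values())[0]).
def Pre_sum_encoded_values (strings : List String) (encoding_dict : List (String × List Int)) : Prop :=
  encoding_dict ≠ []
instance (strings : List String) (encoding_dict : List (String × List Int)) : Decidable (Pre_sum_encoded_values strings encoding_dict) := by unfold Pre_sum_encoded_values; infer_instance

def pvWitness_sum_encoded_values : List String × (List (String × List Int)) :=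
  (["a", "b"], [("a", [1, 0, 0]), ("b", [0, 1, 0])])

-- the encodings actually used: truthy lookups of the input strings (input inspection only)
def pvUsed (strings : List String) (encoding_dict : List (String × List Int)) : List (List Int) :=
  (strings.map (fun s => ((PySem.Dict.mk encoding_dict).get? s).getD [])).filter (fun e => !e.isEmpty)

-- On inputs where some used encoding is longer than the dict's first value or two used encodings
-- have different lengths, A's zip silently drops trailing components (returning the truncated
-- vector's value) while B converts every encoding at its full length; B's value is the intended one.
def D_sum_encoded_values (strings : List String) (encoding_dict : List (String × List Int)) : Prop :=
  (∃ e ∈ pvUsed strings encoding_dict,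
      ((PySem.List.pyGet? (PySem.Dict.mk encoding_dict).values 0).getD []).length < e.length) ∨
  (∃ e ∈ pvUsed strings encoding_dict, ∃ e' ∈ pvUsed strings encoding_dict, e.length ≠ e'.length)
instance (strings : List String) (encoding_dict : List (String × List Int)) : Decidable (D_sum_encoded_values strings encoding_dict) := by unfold D_sum_encoded_values; infer_instance

def Spec_sum_encoded_values (strings : List String) (encoding_dict : List (String × List Int)) (out : Int) : Prop := ¬ D_sum_encoded_values strings encoding_dict → out = sum_encoded_values_alt strings encoding_dict
instance (strings : List String) (encoding_dict : List (String × List Int)) (out : Int) : Decidable (Spec_sum_encoded_values strings encoding_dict out) := by unfold Spec_sum_encoded_values; infer_instance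

def pvDiffWitness_sum_encoded_values : List String × (List (String × List Int)) :=
  (["a", "b"], [("a", [1]), ("b", [0, 1])])
def pvDiffWitnessOut_sum_encoded_values : Int × Int := (1, 2)

-- ===== CLAIM (what is proved, stated in full; the proofs are below) =====
def Claim_unchanged_sum_encoded_values : Prop := ∀ (strings : List String) (encoding_dict : List (String × List Int)), Dom_sum_encoded_values strings encoding_dict → Pre_sum_encoded_values strings encoding_dict → Spec_sum_encoded_values strings encoding_dict (sum_encoded_values strings encoding_dict)
def Claim_changed_sum_encoded_values : Prop := Dom_sum_encoded_values (pvDiffWitness_sum_encoded_values.1) (pvDiffWitness_sum_encoded_values.2) ∧ Pre_sum_encoded_values (pvDiffWitness_sum_encoded_values.1) (pvDiffWitness_sum_encoded_values.2) ∧ D_sum_encoded_values (pvDiffWitness_sum_encoded_values.1) (pvDiffWitness_sum_encoded_values.2) ∧ sum_encoded_values (pvDiffWitness_sum_encoded_values.1) (pvDiffWitness_sum_encoded_values.2) = pvDiffWitnessOut_sum_encoded_values.1 ∧ sum_encoded_values_alt (pvDiffWitness_sum_encoded_values.1) (pvDiffWitness_sum_encoded_values.2) = pvDiffWitnessOut_sum_encoded_values.2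 ∧ pvDiffWitnessOut_sum_encoded_values.1 ≠ pvDiffWitnessOut_sum_encoded_values.2

-- ===== LEMMAS AND PROOFS =====

-- decimal value of the first w components of e, most significant first
def pvDec (e : List Int) (w : Nat) : Int :=
  ((List.range w).map (fun j => e.getD j 0 * 2 ^ (w - 1 - j))).sum

-- vector accumulation core of A
def pvVSum (es : List (List Int)) (r : List Int) : List Int :=
  es.foldl (fun r e => List.zipWith (· + ·) r e) r

theorem pvFold_eq (strings : List String) (d : PySem.Dict String (List Int)) (r : List Int) :
    strings.foldl (fun r s =>
      match d.get? s with
      | some e => if e = [] then r else List.zipWith (· + ·) r e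
      | none => r) r
    = pvVSum ((strings.map (fun s => (d.get? s).getD [])).filter (fun e => !e.isEmpty)) r := by
  induction strings generalizing r with
  | nil => rfl
  | cons s ss ih =>
    simp only [List.foldl_cons, List.map_cons]
    cases h : d.get? s with
    | none => simp [ih, pvVSum]
    | some e =>
      cases e with
      | nil => simp [ih, pvVSum]
      | cons x xs => simp [ih, pvVSum]

theorem pvFoldB_eq (strings : List String) (d : PySem.Dict String (List Int)) (a : Int) :
    strings.foldl (fun total s =>
      match d.get? s with
      | some e => if e = [] then total else total + e.foldl (fun v c => 2 * v + c) 0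
      | none => total) a
    = a + (((strings.map (fun s => (d.get? s).getD [])).filter (fun e => !e.isEmpty)).map
        (fun e => e.foldl (fun v c => 2 * v + c) 0)).sum := by
  induction strings generalizing a with
  | nil => simp
  | cons s ss ih =>
    simp only [List.foldl_cons, List.map_cons]
    cases h : d.get? s with
    | none => simp [ih]
    | some e =>
      cases e with
      | nil => simp [ih]
      | cons x xs =>
        simp only [Option.getD_some, List.filter_cons]
        simp [ih, add_assoc]

theorem pvVSum_length (es : List (List Int)) (r : List Int) :
    (pvVSum es r).length = es.foldl (fun m e => Nat.min m e.length) r.length := by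
  induction es generalizing r with
  | nil => rfl
  | cons e es ih =>
    have hstep : pvVSum (e :: es) r = pvVSum es (List.zipWith (· + ·) r e) := rfl
    rw [hstep, ih, List.length_zipWith]
    rfl

theorem pvFoldMin_le (es : List (List Int)) (a : Nat) :
    es.foldl (fun m e => Nat.min m e.length) a ≤ a := by
  induction es generalizing a with
  | nil => simp
  | cons e es ih => exact le_trans (ih _) (Nat.min_le_left _ _)

theorem pvVSum_getD (es : List (List Int)) (r : List Int) (j : Nat)
    (hj : j < (pvVSum es r).length) :
    (pvVSum es r).getD j 0 = r.getD j 0 + (es.map (fun e => e.getD j 0)).sum := by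
  induction es generalizing r with
  | nil => simp [pvVSum]
  | cons e es ih =>
    have hstep : pvVSum (e :: es) r = pvVSum es (List.zipWith (· + ·) r e) := rfl
    rw [hstep] at hj ⊢
    have hlen : j < (List.zipWith (· + ·) r e).length := by
      have := pvFoldMin_le es (List.zipWith (· + ·) r e).length
      rw [pvVSum_length] at hj
      omega
    have hr : j < r.length := by rw [List.length_zipWith] at hlen; omega
    have he : j < e.length := by rw [List.length_zipWith] at hlen; omega
    rw [ih _ hj]
    simp only [List.map_cons, List.sum_cons]
    rw [List.getD_eq_getElem _ _ hlen, List.getElem_zipWith, List.getD_eq_getElem _ _ hr,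
      List.getD_eq_getElem _ _ he]
    ring

-- A's binary-to-decimal loop over the reversed vector, as a front-indexed sum
theorem pvRevSum_eq (v : List Int) :
    (PySem.List.enumerate v.reverse 0).foldl (fun acc p => acc + p.2 * 2 ^ p.1.toNat) 0
    = pvDec v v.length := by
  unfold pvDec
  rw [PySem.List.foldl_add (g := fun p : Int × Int => p.2 * 2 ^ p.1.toNat)]
  induction v with
  | nil => rfl
  | cons a v ih =>
    rw [List.reverse_cons, PySem.List.enumerate_append]
    simp only [List.map_append, List.sum_append, List.length_reverse, zero_add] at ih ⊢
    rw [ih]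
    have h1 : ((PySem.List.enumerate [a] (↑v.length : Int)).map
        (fun p : Int × Int => p.2 * 2 ^ p.1.toNat)).sum = a * 2 ^ v.length := by
      simp [PySem.List.enumerate_cons, PySem.List.enumerate_nil]
    rw [h1]
    simp only [List.length_cons]
    rw [List.range_succ_eq_map]
    simp only [List.map_cons, List.map_map, List.sum_cons, List.getD_cons_zero]
    have h2 : ((List.range v.length).map
          ((fun j => (a :: v).getD j 0 * 2 ^ (v.length + 1 - 1 - j)) ∘ Nat.succ)).sum
        = ((List.range v.length).map (fun j => v.getD j 0 * 2 ^ (v.length - 1 - j))).sum := by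
      apply congrArg
      apply List.map_congr_left
      intro k hk
      have hk' := List.mem_range.1 hk
      simp only [Function.comp_apply, List.getD_cons_succ]
      congr 2
      omega
    rw [h2]
    have h3 : v.length + 1 - 1 - 0 = v.length := by omega
    rw [h3]
    ring

-- exchanging the two summations
theorem pvSwap (es : List (List Int)) (w : Nat) :
    ((List.range w).map (fun j => (es.map (fun e => e.getD j 0)).sum * 2 ^ (w - 1 - j))).sum
    = (es.map (fun e => pvDec e w)).sum := by
  induction es with
  | nil => simp [pvDec]
  | cons e es ih =>
    simp only [List.map_cons, List.sum_cons]
    have : ∀ j : Nat, (e.getD j 0 + (es.map (fun e => e.getD j 0)).sum) * 2 ^ (w - 1 - j)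
        = e.getD j 0 * 2 ^ (w - 1 - j) + (es.map (fun e => e.getD j 0)).sum * 2 ^ (w - 1 - j) := by
      intro j; ring
    simp only [this]
    rw [PySem.List.sum_map_add_int, ih]
    rfl

theorem pvDec_cons (c : Int) (cs : List Int) :
    pvDec (c :: cs) (cs.length + 1) = c * 2 ^ cs.length + pvDec cs cs.length := by
  unfold pvDec
  rw [List.range_succ_eq_map]
  simp only [List.map_cons, List.map_map, List.sum_cons, List.getD_cons_zero]
  have h2 : ((List.range cs.length).map
        ((fun j => (c :: cs).getD j 0 * 2 ^ (cs.length + 1 - 1 - j)) ∘ Nat.succ)).sum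
      = ((List.range cs.length).map (fun j => cs.getD j 0 * 2 ^ (cs.length - 1 - j))).sum := by
    apply congrArg
    apply List.map_congr_left
    intro k hk
    have hk' := List.mem_range.1 hk
    simp only [Function.comp_apply, List.getD_cons_succ]
    congr 2
    omega
  rw [h2]
  have h3 : cs.length + 1 - 1 - 0 = cs.length := by omega
  rw [h3]

-- Horner's rule computes the fixed-width decimal value at the list's own length
theorem pvHorner_eq (e : List Int) : ∀ a : Int,
    e.foldl (fun v c => 2 * v + c) a = a * 2 ^ e.length + pvDec e e.length := by
  induction e with
  | nil => intro a; simp [pvDec]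
  | cons c cs ih =>
    intro a
    rw [List.foldl_cons, ih (2 * a + c), List.length_cons, pvDec_cons]
    ring

theorem pvFoldMin_self (ls : List Nat) (l : Nat) (h : ∀ x ∈ ls, x = l) :
    ls.foldl Nat.min l = l := by
  induction ls with
  | nil => rfl
  | cons x xs ih =>
    have hx : x = l := h x (by simp)
    have h1 : Nat.min l l = l := Nat.min_self l
    rw [List.foldl_cons, hx, h1]
    exact ih (fun y hy => h y (by simp [hy]))

theorem pvFoldMin_const (ls : List Nat) (l a : Nat) (h : ∀ x ∈ ls, x = l) (hla : l ≤ a)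
    (hne : ls ≠ []) : ls.foldl Nat.min a = l := by
  cases ls with
  | nil => exact absurd rfl hne
  | cons x xs =>
    have hx : x = l := h x (by simp)
    have h1 : Nat.min a l = l := Nat.min_eq_right hla
    rw [List.foldl_cons, hx, h1]
    exact pvFoldMin_self xs l (fun y hy => h y (by simp [hy]))

theorem pvReplicate_getD (n j : Nat) : (List.replicate n (0 : Int)).getD j 0 = 0 := by
  by_cases h : j < n
  · rw [List.getD_eq_getElem _ _ (by simpa using h)]; simp
  · rw [List.getD_eq_default]; simpa using h

-- ===== VERDICT (by name: the statements are the Claim_ definitions above) =====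
theorem sum_encoded_values_spec : Claim_unchanged_sum_encoded_values := by
  intro strings encoding_dict _ _ hnd
  unfold sum_encoded_values sum_encoded_values_alt
  simp only []
  set d := PySem.Dict.mk encoding_dict with hd
  set L := ((PySem.List.pyGet? d.values 0).getD []).length with hL
  set used := (strings.map (fun s => (d.get? s).getD [])).filter (fun e => !e.isEmpty) with hused
  have husedD : used = pvUsed strings encoding_dict := rfl
  unfold D_sum_encoded_values at hnd
  push Not at hnd
  obtain ⟨hle, heq⟩ := hnd
  rw [← husedD] at hle heq
  rw [← hL] at hle
  rw [pvFold_eq strings d (List.replicate L 0), pvRevSum_eq,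
    pvFoldB_eq strings d 0, zero_add]
  have hw : (pvVSum used (List.replicate L 0)).length
      = (used.map List.length).foldl Nat.min L := by
    rw [pvVSum_length, List.length_replicate, List.foldl_map]
  rw [hw]
  set w := (used.map List.length).foldl Nat.min L with hwdef
  have hAsum : pvDec (pvVSum used (List.replicate L 0)) w
      = ((List.range w).map
          (fun j => (used.map (fun e => e.getD j 0)).sum * 2 ^ (w - 1 - j))).sum := by
    unfold pvDec
    apply congrArg
    apply List.map_congr_left
    intro j hj
    have hj' : j < w := List.mem_range.1 hj
    rw [pvVSum_getD used _ j (by rw [pvVSum_length, List.length_replicate, ← List.foldl_map]; exact hj'),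
      pvReplicate_getD]
    ring_nf
  rw [hAsum, pvSwap, ← hused]
  cases hu : used with
  | nil => simp
  | cons e0 rest =>
    rw [hu] at hle heq
    have hme0 : e0 ∈ e0 :: rest := by simp
    have hall : ∀ x ∈ used.map List.length, x = e0.length := by
      intro x hx
      obtain ⟨e, he, hex⟩ := List.mem_map.1 hx
      rw [← hex]
      exact heq e (hu ▸ he) e0 hme0
    have hne : used.map List.length ≠ [] := by rw [hu]; simp
    have hwl : w = e0.length := by
      rw [hwdef]
      exact pvFoldMin_const _ _ _ hall (hle e0 hme0) hne
    apply congrArg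
    apply List.map_congr_left
    intro e he
    have hel : e.length = w := by
      rw [hwl]
      exact heq e he e0 hme0
    rw [pvHorner_eq e 0, ← hel]
    simp

theorem sum_encoded_values_changed : Claim_changed_sum_encoded_values := by
  unfold Claim_changed_sum_encoded_values; decide
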